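-- pv_equiv track=rewrite | github.com/MarielaCarlita/M | codigo2.py | get_pivot_from_compressed_column
-- ===== SOURCE A (Python) =====
-- def get_pivot_from_compressed_column (compressed_column):
--     if len(compressed_column) == 0:
--         return -1
--
--     possible_pivot = compressed_column[0]
--     i = 1
--     while i < len(compressed_column):
--         if possible_pivot == -1:
--             possible_pivot = compressed_column[i]
--
--         elif compressed_column[i] != possible_pivot:
--             return possible_pivot
--
--         else:
--             compressed_column.pop(0); compressed_column.pop(0)
--             i -= 2
--             possible_pivot = -1
--
--         i += 1
--     return possible_pivot
-- ===== SOURCE B (Python) =====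
-- def get_pivot_from_compressed_column(compressed_column):
--     # Single forward pass over the original list; no mutation of the argument
--     # (A pops consumed pairs off the front, B does not -- return value only).
--     if not compressed_column:
--         return -1
--     pending = compressed_column[0]
--     for v in compressed_column[1:]:
--         if pending == -1:
--             pending = v
--         elif v != pending:
--             return pending
--         else:
--             pending = -1
--     return pending
-- ===== Notes on version B (the rewrite author's own statement) =====
-- stated objective: faster
-- what changed: B replaces A's mutating while-loop (which pops cancelled pairs off the front of the list and rewinds the index) by a single non-mutating forward pass carrying only the pending pivot value; A mutates its argument, B does not (return value only).
import Mathlib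
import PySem

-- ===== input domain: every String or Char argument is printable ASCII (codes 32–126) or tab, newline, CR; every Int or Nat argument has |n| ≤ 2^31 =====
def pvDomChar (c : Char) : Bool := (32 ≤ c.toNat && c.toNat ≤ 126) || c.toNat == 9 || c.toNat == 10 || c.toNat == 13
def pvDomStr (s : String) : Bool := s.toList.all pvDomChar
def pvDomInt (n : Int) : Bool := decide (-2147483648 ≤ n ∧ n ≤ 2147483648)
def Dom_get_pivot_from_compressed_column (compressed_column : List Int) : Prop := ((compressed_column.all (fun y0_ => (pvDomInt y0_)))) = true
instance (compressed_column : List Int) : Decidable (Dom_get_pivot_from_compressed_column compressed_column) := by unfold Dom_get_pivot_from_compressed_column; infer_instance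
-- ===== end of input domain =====

-- B replaces A's mutating pop(0)/index-rewind loop by one non-mutating forward pass
-- (equivalence is about the RETURN value: A mutates its argument, B does not).

-- ===== PORT A =====
-- A's while loop: state (c, possible_pivot, i); 'compressed_column.pop(0); pop(0); i -= 2'
-- followed by the loop's 'i += 1' is c := c.tail.tail, i := i - 1 (pop(0) removes the head).
-- '(… ).getD 0' only fires when pyGet? is none, which the loop guard makes unreachable
-- (Python raises nowhere here).
def pvAloop (c : List Int) (pp : Int) (i : Int) : Int :=
  if h : i < (c.length : Int) then
    if pp = -1 then
      pvAloop c ((PySem.List.pyGet? c i).getD 0) (i + 1)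
    else if (PySem.List.pyGet? c i).getD 0 ≠ pp then
      pp
    else
      -- 'compressed_column.pop(0); compressed_column.pop(0)': removes the first two
      -- elements; on a list with fewer than two elements Python's pop(0) raises
      -- (unreachable here), so that case exits with a dummy value.
      match h2 : c with
      | _ :: _ :: rest => pvAloop rest (-1) (i - 1)
      | _ => 0
  else pp
termination_by (2 * (c.length : Int) - i).toNat
decreasing_by
  · omega
  · subst h2; simp only [List.length_cons] at *; omega

def get_pivot_from_compressed_column (compressed_column : List Int) : Int :=
  match compressed_column with
  | [] => -1
  | x :: _ => pvAloop compressed_column x 1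

-- ===== PORT B =====
def pvBloop (pp : Int) : List Int → Int
  | [] => pp
  | v :: rest =>
    if pp = -1 then pvBloop v rest
    else if v ≠ pp then pp
    else pvBloop (-1) rest

def get_pivot_from_compressed_column_alt (compressed_column : List Int) : Int :=
  match compressed_column with
  | [] => -1
  | x :: rest => pvBloop x rest

-- ===== PRECONDITION & SPEC =====
def Spec_get_pivot_from_compressed_column (compressed_column : List Int) (out : Int) : Prop := out = get_pivot_from_compressed_column_alt compressed_column
instance (compressed_column : List Int) (out : Int) : Decidable (Spec_get_pivot_from_compressed_column compressed_column out) := by unfold Spec_get_pivot_from_compressed_column; infer_instance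

-- ===== CLAIM (what is proved, stated in full; the proofs are below) =====
def Claim_equal_get_pivot_from_compressed_column : Prop := ∀ (compressed_column : List Int), Dom_get_pivot_from_compressed_column compressed_column → Spec_get_pivot_from_compressed_column compressed_column (get_pivot_from_compressed_column compressed_column)

-- ===== LEMMAS AND PROOFS =====

-- A's loop with the suffix from index i left to scan equals B's fold over that suffix.
theorem pvAloop_eq_pvBloop (c : List Int) (pp : Int) (i : Int) :
    0 ≤ i → (pp ≠ -1 → 1 ≤ i) → pvAloop c pp i = pvBloop pp (c.drop i.toNat) := by
  induction c, pp, i using pvAloop.induct with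
  | case1 c i hlt ih =>
    intro h0 _
    have hn : i.toNat < c.length := by omega
    have hg := PySem.List.pyGet?_eq_some_getElem c h0 hlt
    have hd := (List.getElem_cons_drop (as := c) (i := i.toNat) hn).symm
    simp only [hg, Option.getD_some] at ih
    rw [pvAloop]
    simp only [hlt, dite_true, hg, Option.getD_some, if_true]
    rw [ih (by omega) (fun _ => by omega), hd, pvBloop, if_pos rfl,
      show (i + 1).toNat = i.toNat + 1 by omega]
  | case2 c pp i hlt hpp hne =>
    intro h0 _
    have hn : i.toNat < c.length := by omega
    have hg := PySem.List.pyGet?_eq_some_getElem c h0 hlt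
    have hd := (List.getElem_cons_drop (as := c) (i := i.toNat) hn).symm
    rw [hg, Option.getD_some] at hne
    rw [pvAloop]
    simp only [hlt, dite_true, if_neg hpp, hg, Option.getD_some, if_pos hne]
    rw [hd, pvBloop, if_neg hpp, if_pos hne]
  | case3 pp i hpp a b rest hlt heq ih =>
    intro h0 h1
    have hi1 : 1 ≤ i := h1 hpp
    have hn : i.toNat < (a :: b :: rest).length := by omega
    have hg := PySem.List.pyGet?_eq_some_getElem (a :: b :: rest) h0 hlt
    have hd := (List.getElem_cons_drop (as := a :: b :: rest) (i := i.toNat) hn).symm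
    rw [hg, Option.getD_some, not_ne_iff] at heq
    rw [pvAloop]
    simp only [hlt, dite_true, if_neg hpp, hg, Option.getD_some, heq,
      if_neg (not_not_intro rfl)]
    rw [ih (by omega) (fun h => absurd rfl h), hd, pvBloop, if_neg hpp, heq,
      if_neg (not_not_intro rfl)]
    congr 1
    have hdrop : List.drop (i.toNat + 1) (a :: b :: rest)
        = List.drop (i.toNat - 1) rest := by
      rw [show i.toNat + 1 = (i.toNat - 1) + 2 by omega]
      rfl
    rw [hdrop]
    congr 1
    omega
  | case4 c pp i hpp heq hlt himp =>
    intro h0 h1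
    have hi1 : 1 ≤ i := h1 hpp
    exfalso
    match c, hlt, himp with
    | a :: b :: rest, hlt, himp => exact himp a b rest hlt rfl HEq.rfl
    | [], hlt, _ => simp at hlt; omega
    | [a], hlt, _ => simp at hlt; omega
  | case5 c pp i hlt =>
    intro h0 _
    rw [pvAloop]
    simp only [hlt, dite_false]
    have hd : List.drop i.toNat c = [] := List.drop_eq_nil_of_le (by omega)
    rw [hd, pvBloop]

theorem pv_main (compressed_column : List Int) :
    get_pivot_from_compressed_column compressed_column
      = get_pivot_from_compressed_column_alt compressed_column := by
  cases compressed_column with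
  | nil => rfl
  | cons x rest =>
    show pvAloop (x :: rest) x 1 = pvBloop x rest
    rw [pvAloop_eq_pvBloop (x :: rest) x 1 (by omega) (fun _ => le_refl 1)]
    rfl

-- ===== VERDICT (by name: the statement is the Claim_ definition above) =====
theorem get_pivot_from_compressed_column_spec : Claim_equal_get_pivot_from_compressed_column := by
  intro c _
  exact pv_main c
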